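-- pv_equiv track=rewrite | github.com/hattmo/projects | adventOfCode/2015/day11_2/solution.py | has_pairs
-- ===== SOURCE A (Python) =====
-- def has_pairs(test:list):
--     first_pair = None
--     i = 0
--     test_len = len(test)
--     while i < test_len-1:
--         if test[i] == test[i+1]:
--             if first_pair == None:
--                 first_pair = test[i]
--             elif test[i] != first_pair:
--                 return True
--         i+=1
--     return False
-- ===== SOURCE B (Python) =====
-- def has_pairs(test: list):
--     found = []
--     for x, y in zip(test, test[1:]):
--         if x == y and x not in found:
--             found.append(x)
--     return len(found) >= 2
-- ===== Notes on version B (the rewrite author's own statement) =====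
-- stated objective: simpler
-- what changed: Replaces the index-based while loop with a first_pair sentinel and early return by a single zip pass over adjacent elements that collects the distinct pair values and compares their count with 2.
import Mathlib
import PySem

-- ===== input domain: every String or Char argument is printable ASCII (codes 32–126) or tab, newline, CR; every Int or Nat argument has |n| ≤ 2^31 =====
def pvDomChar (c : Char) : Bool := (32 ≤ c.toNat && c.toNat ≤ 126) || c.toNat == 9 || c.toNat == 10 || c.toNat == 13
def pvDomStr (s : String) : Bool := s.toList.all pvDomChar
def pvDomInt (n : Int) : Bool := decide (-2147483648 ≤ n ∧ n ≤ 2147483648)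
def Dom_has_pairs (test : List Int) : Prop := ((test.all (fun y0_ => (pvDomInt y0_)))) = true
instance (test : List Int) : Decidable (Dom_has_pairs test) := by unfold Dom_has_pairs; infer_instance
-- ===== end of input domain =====

-- ===== PORT A =====
-- literal port of A: while loop over index i with a first_pair sentinel and early return
def has_pairs_go (test : List Int) (first_pair : Option Int) (i : Nat) : Bool :=
  if h : i < test.length - 1 then
    match PySem.List.pyGet? test (i : Int), PySem.List.pyGet? test ((i : Int) + 1) with
    | some a, some b =>
      if a = b then
        if first_pair = none then has_pairs_go test (some a) (i + 1)
        else if some a ≠ first_pair then true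
        else has_pairs_go test first_pair (i + 1)
      else has_pairs_go test first_pair (i + 1)
    | _, _ => false  -- unreachable: i and i+1 are always in range here
  else false
  termination_by test.length - 1 - i
  decreasing_by all_goals omega

def has_pairs (test : List Int) : Bool := has_pairs_go test none 0

-- ===== PORT B =====
def has_pairs_alt_step (found : List Int) (p : Int × Int) : List Int :=
  if p.1 = p.2 ∧ p.1 ∉ found then found ++ [p.1] else found

def has_pairs_alt (test : List Int) : Bool :=
  let found := (test.zip (PySem.List.slice test (some 1) none)).foldl has_pairs_alt_step []
  decide (2 ≤ found.length)

-- ===== PRECONDITION & SPEC =====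
def Spec_has_pairs (test : List Int) (out : Bool) : Prop := out = has_pairs_alt test
instance (test : List Int) (out : Bool) : Decidable (Spec_has_pairs test out) := by unfold Spec_has_pairs; infer_instance

-- ===== CLAIM (what is proved, stated in full; the proofs are below) =====
def Claim_equal_has_pairs : Prop := ∀ (test : List Int), Dom_has_pairs test → Spec_has_pairs test (has_pairs test)

-- ===== LEMMAS AND PROOFS =====

-- structural reference for A's loop, on the list of adjacent pairs
def refA (fp : Option Int) : List (Int × Int) → Bool
  | [] => false
  | p :: rest =>
    if p.1 = p.2 then
      match fp with
      | none => refA (some p.1) rest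
      | some v => if p.1 ≠ v then true else refA fp rest
    else refA fp rest

theorem refA_cons_none (x y : Int) (rest : List (Int × Int)) :
    refA none ((x, y) :: rest)
      = if x = y then refA (some x) rest else refA none rest := rfl

theorem refA_cons_some (v x y : Int) (rest : List (Int × Int)) :
    refA (some v) ((x, y) :: rest)
      = if x = y then (if x ≠ v then true else refA (some v) rest)
        else refA (some v) rest := rfl

theorem length_pairs (test : List Int) : (test.zip test.tail).length = test.length - 1 := by
  simp [List.length_zip, List.length_tail]

theorem go_eq_refA (test : List Int) (k : Nat) :
    ∀ i, test.length - 1 - i ≤ k → ∀ fp : Option Int,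
      has_pairs_go test fp i = refA fp ((test.zip test.tail).drop i) := by
  induction k with
  | zero =>
    intro i hi fp
    rw [has_pairs_go]
    have hlen : (test.zip test.tail).length ≤ i := by rw [length_pairs]; omega
    rw [List.drop_eq_nil_of_le hlen]
    have : ¬ i < test.length - 1 := by omega
    simp [this, refA]
  | succ k ih =>
    intro i hi fp
    by_cases hlt : i < test.length - 1
    · rw [has_pairs_go]
      have h1 : i < test.length := by omega
      have h2 : i + 1 < test.length := by omega
      have hp : i < (test.zip test.tail).length := by rw [length_pairs]; omega
      have e1 : PySem.List.pyGet? test (i : Int) = some test[i] := by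
        rw [PySem.List.pyGet?_natCast, List.getElem?_eq_getElem h1]
      have e2 : PySem.List.pyGet? test ((i : Int) + 1) = some test[i+1] := by
        have : ((i : Int) + 1) = ((i + 1 : Nat) : Int) := by push_cast; ring
        rw [this, PySem.List.pyGet?_natCast, List.getElem?_eq_getElem h2]
      have hpair : (test.zip test.tail)[i] = (test[i], test[i+1]) := by
        simp [List.getElem_zip, List.getElem_tail]
      rw [List.drop_eq_getElem_cons hp, hpair]
      simp only [hlt, dif_pos, e1, e2]
      have ihr : ∀ fp', has_pairs_go test fp' (i + 1)
          = refA fp' ((test.zip test.tail).drop (i + 1)) := fun fp' => ih (i+1) (by omega) fp'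
      cases fp with
      | none =>
        rw [refA_cons_none]
        by_cases hab : test[i] = test[i+1]
        · rw [if_pos hab, if_pos hab, if_pos rfl]
          exact ihr _
        · rw [if_neg hab, if_neg hab]
          exact ihr _
      | some v =>
        rw [refA_cons_some]
        by_cases hab : test[i] = test[i+1]
        · by_cases hv : test[i] = v
          · rw [if_pos hab, if_pos hab, if_neg (show ¬((some v : Option Int) = none) by simp),
                if_neg (show ¬(some (test[i]) ≠ some v) by simp [hv]),
                if_neg (show ¬(test[i] ≠ v) by simp [hv])]
            exact ihr _
          · rw [if_pos hab, if_pos hab, if_neg (show ¬((some v : Option Int) = none) by simp),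
                if_pos (show some (test[i]) ≠ some v by simp [hv]),
                if_pos (show test[i] ≠ v from hv)]
        · rw [if_neg hab, if_neg hab]
          exact ihr _
    · rw [has_pairs_go]
      have hlen : (test.zip test.tail).length ≤ i := by rw [length_pairs]; omega
      rw [List.drop_eq_nil_of_le hlen]
      simp [hlt, refA]

theorem foldl_step_length_mono (l : List (Int × Int)) :
    ∀ found : List Int, found.length ≤ (l.foldl has_pairs_alt_step found).length := by
  induction l with
  | nil => intro found; simp
  | cons p rest ih =>
    intro found
    refine le_trans ?_ (ih (has_pairs_alt_step found p))
    unfold has_pairs_alt_step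
    split <;> simp

theorem refA_some_eq (l : List (Int × Int)) :
    ∀ fp : Int, refA (some fp) l = decide (2 ≤ (l.foldl has_pairs_alt_step [fp]).length) := by
  induction l with
  | nil => intro fp; simp [refA]
  | cons p rest ih =>
    intro fp
    obtain ⟨x, y⟩ := p
    rw [refA_cons_some]
    by_cases hab : x = y
    · by_cases hv : x = fp
      · have hstep : has_pairs_alt_step [fp] (x, y) = [fp] := by
          unfold has_pairs_alt_step
          exact if_neg (fun h => h.2 (by simp [hv]))
        rw [if_pos hab, if_neg (show ¬(x ≠ fp) by simp [hv]), List.foldl_cons, hstep]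
        exact ih fp
      · have hstep : has_pairs_alt_step [fp] (x, y) = [fp, x] := by
          unfold has_pairs_alt_step
          exact if_pos ⟨hab, by simp [hv]⟩
        rw [if_pos hab, if_pos hv, List.foldl_cons, hstep]
        have hlen : 2 ≤ (rest.foldl has_pairs_alt_step [fp, x]).length :=
          le_trans (by norm_num) (foldl_step_length_mono rest [fp, x])
        simp [hlen]
    · have hstep : has_pairs_alt_step [fp] (x, y) = [fp] := by
        unfold has_pairs_alt_step
        exact if_neg (fun h => hab h.1)
      rw [if_neg hab, List.foldl_cons, hstep]
      exact ih fp

theorem refA_none_eq (l : List (Int × Int)) :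
    refA none l = decide (2 ≤ (l.foldl has_pairs_alt_step []).length) := by
  induction l with
  | nil => simp [refA]
  | cons p rest ih =>
    obtain ⟨x, y⟩ := p
    rw [refA_cons_none]
    by_cases hab : x = y
    · have hstep : has_pairs_alt_step [] (x, y) = [x] := by
        unfold has_pairs_alt_step
        exact if_pos ⟨hab, by simp⟩
      rw [if_pos hab, List.foldl_cons, hstep]
      exact refA_some_eq rest x
    · have hstep : has_pairs_alt_step [] (x, y) = [] := by
        unfold has_pairs_alt_step
        exact if_neg (fun h => hab h.1)
      rw [if_neg hab, List.foldl_cons, hstep]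
      exact ih

-- ===== VERDICT (by name: the statement is the Claim_ definition above) =====
theorem has_pairs_spec : Claim_equal_has_pairs := by
  intro test _
  unfold Spec_has_pairs has_pairs has_pairs_alt
  rw [PySem.List.slice_from_one]
  rw [go_eq_refA test (test.length - 1) 0 (by omega) none]
  simpa using refA_none_eq (test.zip test.tail)
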